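-- pv_equiv track=rewrite | github.com/liuyanghejerry/pokered | pokered-rust/tools/asm2sfx.py | to_rust_hex
-- ===== SOURCE A (Python) =====
-- def to_rust_hex(data):
--     parts = []
--     for i, b in enumerate(data):
--         if i > 0 and i % 16 == 0:
--             parts.append("\n        ")
--         parts.append(f"0x{b:02X}")
--         if i < len(data) - 1:
--             parts.append(", ")
--     return "".join(parts)
-- ===== SOURCE B (Python) =====
-- def to_rust_hex(data):
--     hexes = [f"0x{b:02X}" for b in data]
--     lines = [", ".join(hexes[i:i + 16]) for i in range(0, len(hexes), 16)]
--     return ", \n        ".join(lines)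
-- ===== Notes on version B (the rewrite author's own statement) =====
-- stated objective: alternative
-- what changed: B formats every byte up front, slices the formatted list into chunks of 16 joined with ', ', and joins the lines with ', \n ', replacing A's single accumulator loop with per-index newline/comma tests.
import Mathlib
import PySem

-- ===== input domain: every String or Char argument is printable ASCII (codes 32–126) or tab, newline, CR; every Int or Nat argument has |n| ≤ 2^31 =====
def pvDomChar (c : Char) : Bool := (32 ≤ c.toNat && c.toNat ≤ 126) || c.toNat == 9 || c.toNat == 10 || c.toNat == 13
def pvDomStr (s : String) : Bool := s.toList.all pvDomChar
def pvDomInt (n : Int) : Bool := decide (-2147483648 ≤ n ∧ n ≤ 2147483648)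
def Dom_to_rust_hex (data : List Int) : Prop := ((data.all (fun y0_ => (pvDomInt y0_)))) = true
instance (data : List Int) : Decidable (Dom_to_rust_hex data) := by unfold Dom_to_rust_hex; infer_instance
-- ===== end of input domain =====

-- B formats all bytes up front and assembles lines by slicing into chunks of 16, instead of A's
-- index-tested single accumulator loop; same cost, different decomposition (objective: alternative).

-- ===== PORT A =====
-- shared helper: the characters of Python's f"0x{b:02X}" (no PySem primitive covers hex
-- formatting; exact by construction: uppercase hex digits of |b|, '-' in front for negative b,
-- zero-padded to total width 2 with the sign counted, as CPython's format does)
def pvHexDigit (n : Nat) : Char := if n < 10 then Char.ofNat (48 + n) else Char.ofNat (55 + n)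

def pvHexChars (n : Nat) : List Char :=
  if h : n < 16 then [pvHexDigit n]
  else pvHexChars (n / 16) ++ [pvHexDigit (n % 16)]
  decreasing_by exact Nat.div_lt_self (by omega) (by omega)

def pvFmt0x02X (b : Int) : List Char :=
  '0' :: 'x' ::
    (if b < 0 then '-' :: pvHexChars b.natAbs
     else if (pvHexChars b.natAbs).length < 2 then '0' :: pvHexChars b.natAbs
     else pvHexChars b.natAbs)

def to_rust_hex (data : List Int) : String :=
  let parts := (PySem.List.enumerate data).foldl
    (fun (parts : List String) (ib : Int × Int) =>
      let parts := if 0 < ib.1 ∧ PySem.Int.mod ib.1 16 = 0 then parts ++ ["\n        "] else parts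
      let parts := parts ++ [String.ofList (pvFmt0x02X ib.2)]
      if ib.1 < PySem.List.len data - 1 then parts ++ [", "] else parts) []
  PySem.Str.join "" parts

-- ===== PORT B =====
def to_rust_hex_alt (data : List Int) : String :=
  let hexes := data.map (fun b => String.ofList (pvFmt0x02X b))
  let lines := (PySem.List.pyRange 0 (PySem.List.len hexes) 16).map
    (fun i => PySem.Str.join ", " (PySem.List.slice hexes (some i) (some (i + 16))))
  PySem.Str.join ", \n        " lines

-- ===== PRECONDITION & SPEC =====
def Spec_to_rust_hex (data : List Int) (out : String) : Prop := out = to_rust_hex_alt data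
instance (data : List Int) (out : String) : Decidable (Spec_to_rust_hex data out) := by unfold Spec_to_rust_hex; infer_instance

-- ===== CLAIM (what is proved, stated in full; the proofs are below) =====
def Claim_equal_to_rust_hex : Prop := ∀ (data : List Int), Dom_to_rust_hex data → Spec_to_rust_hex data (to_rust_hex data)

-- ===== LEMMAS AND PROOFS =====

-- canonical form: the hex chunks interleaved with the separator that belongs at each position
def pvSepCh (i : Nat) : List Char := if i % 16 = 0 then (", \n        ").toList else (", ").toList

def pvInterCh : Nat → List (List Char) → List Char
  | _, [] => []
  | i, c :: cs => pvSepCh i ++ c ++ pvInterCh (i + 1) cs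

def pvCanon (hs : List (List Char)) : List Char :=
  match hs with
  | [] => []
  | h :: t => h ++ pvInterCh 1 t

-- A-side trailing form: newline before a 16-boundary element, comma after each non-last element
def pvTailA : Nat → List (List Char) → List Char
  | _, [] => []
  | s, x :: t =>
      (if 0 < s ∧ s % 16 = 0 then ("\n        ").toList else []) ++ x ++
        (if t = [] then [] else (", ").toList) ++ pvTailA (s + 1) t

-- B-side chunk recursion
def pvChunkLines (L : List String) : List String :=
  if h : L = [] then [] else PySem.Str.join ", " (L.take 16) :: pvChunkLines (L.drop 16)
  termination_by L.length
  decreasing_by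
    have : 0 < L.length := List.length_pos_iff.mpr h
    simp only [List.length_drop]; omega

theorem pv_join_toList_cons (sep : String) (a : String) (as : List String) :
    (PySem.Str.join sep (a :: as)).toList =
      a.toList ++ (if as = [] then [] else sep.toList ++ (PySem.Str.join sep as).toList) := by
  cases as with
  | nil => simp [PySem.Str.toList_join, PySem.Chars.join_singleton]
  | cons b r =>
      simp only [PySem.Str.toList_join, List.map_cons]
      rw [PySem.Chars.join_cons_cons]
      simp [PySem.Str.toList_join]

theorem pv_join_empty0 (ps : List (List Char)) : PySem.Chars.join [] ps = ps.flatten := by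
  induction ps with
  | nil => simp [PySem.Chars.join_nil]
  | cons a t ih =>
      cases t with
      | nil => simp [PySem.Chars.join_singleton]
      | cons b r => simp_all [PySem.Chars.join_cons_cons]

theorem pv_join0 (L : List String) :
    (PySem.Str.join "" L).toList = (L.map String.toList).flatten := by
  rw [PySem.Str.toList_join, show ("" : String).toList = [] from rfl, pv_join_empty0]

theorem pv_foldA (n : Nat) (xs : List Int) (s : Nat) (acc : List String)
    (hn : n = s + xs.length) :
    (PySem.Str.join "" (((PySem.List.enumerate xs (s : Int))).foldl
      (fun (parts : List String) (ib : Int × Int) =>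
        let parts := if 0 < ib.1 ∧ PySem.Int.mod ib.1 16 = 0 then parts ++ ["
        "] else parts
        let parts := parts ++ [String.ofList (pvFmt0x02X ib.2)]
        if ib.1 < (n : Int) - 1 then parts ++ [", "] else parts) acc)).toList =
      (PySem.Str.join "" acc).toList ++ pvTailA s (xs.map pvFmt0x02X) := by
  induction xs generalizing s acc with
  | nil => simp [PySem.List.enumerate, pvTailA]
  | cons x t ih =>
      simp only [List.length_cons] at hn
      rw [PySem.List.enumerate_cons, List.foldl_cons]
      have hcast : (s : Int) + 1 = ((s + 1 : Nat) : Int) := by push_cast; ring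
      rw [hcast, ih (s + 1) _ (by omega)]
      have h1 : (0 < (s:Int) ∧ PySem.Int.mod (s:Int) 16 = 0) = (0 < s ∧ s % 16 = 0) := by
        rw [PySem.Int.mod_eq_emod_of_pos (by norm_num)]
        apply propext; constructor <;> (intro h; obtain ⟨a, b⟩ := h; constructor <;> omega)
      have h2 : ((s:Int) < (n : Int) - 1) = (t ≠ []) := by
        apply propext
        constructor
        · intro h he; subst he; simp at hn; omega
        · intro h; have : 0 < t.length := List.length_pos_iff.mpr h; omega
      simp only [h1, h2, List.map_cons, pvTailA, List.map_eq_nil_iff]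
      clear ih
      split_ifs <;>
        simp_all [pv_join0, pv_join_empty0, List.map_append, List.flatten_append]


theorem pv_sepCh_split (i : Nat) :
    pvSepCh i = (", ").toList ++ (if i % 16 = 0 then ("\n        ").toList else []) := by
  unfold pvSepCh; split_ifs <;> rfl

theorem pv_tailA_interCh (xs : List (List Char)) (s : Nat) (hs : 0 < s) :
    (if xs = [] then ([] : List Char) else (", ").toList) ++ pvTailA s xs = pvInterCh s xs := by
  induction xs generalizing s with
  | nil => simp [pvTailA, pvInterCh]
  | cons x t ih =>
      simp only [pvTailA, pvInterCh, if_neg (List.cons_ne_nil x t)]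
      rw [pv_sepCh_split, ← ih (s + 1) (by omega)]
      simp only [and_iff_right hs]
      ac_rfl

theorem pv_interCh_append (xs ys : List (List Char)) (s : Nat) :
    pvInterCh s (xs ++ ys) = pvInterCh s xs ++ pvInterCh (s + xs.length) ys := by
  induction xs generalizing s with
  | nil => simp [pvInterCh]
  | cons x t ih => simp [pvInterCh, ih, Nat.add_assoc, Nat.add_comm 1 t.length]

theorem pv_inner_tail (rest : List String) (j : Nat) (hj : 0 < j % 16)
    (hlen : j % 16 + rest.length ≤ 16) :
    (if rest = [] then ([] : List Char)
      else (", ").toList ++ (PySem.Str.join ", " rest).toList) =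
    pvInterCh j (rest.map String.toList) := by
  induction rest generalizing j with
  | nil => simp [pvInterCh]
  | cons y r2 ih =>
      simp only [if_neg (List.cons_ne_nil y r2), List.map_cons, pvInterCh]
      rw [pv_join_toList_cons]
      have hsep : pvSepCh j = (", ").toList := by unfold pvSepCh; rw [if_neg (by omega)]
      rw [hsep]
      cases r2 with
      | nil => simp [pvInterCh]
      | cons z r3 =>
          rw [← ih (j + 1) (by simp at hlen ⊢; omega) (by simp at hlen ⊢; omega)]
          simp
  
theorem pv_inner_chunk (c : List String) (j : Nat) (hc : c ≠ []) (hj : j % 16 = 0)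
    (hlen : c.length ≤ 16) :
    (", \n        ").toList ++ (PySem.Str.join ", " c).toList =
      pvInterCh j (c.map String.toList) := by
  cases c with
  | nil => exact absurd rfl hc
  | cons x rest =>
      simp only [List.map_cons, pvInterCh]
      have hsep : pvSepCh j = (", \n        ").toList := by unfold pvSepCh; rw [if_pos hj]
      rw [hsep, pv_join_toList_cons,
        ← pv_inner_tail rest (j + 1) (by omega) (by simp at hlen; omega)]
      simp

theorem pv_pyRange16 (n : Nat) :
    PySem.List.pyRange 0 (n : Int) 16 =
      (List.range ((n + 15) / 16)).map (fun k : Nat => (0 : Int) + 16 * ↑k) := by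
  rw [PySem.List.pyRange_of_pos _ _ (by norm_num)]
  congr 1
  split_ifs with h
  · have e : ((n:Int) - 0 + 16 - 1) = ((n + 15 : Nat) : Int) := by push_cast; ring
    rw [e, show (16:Int) = ((16:Nat):Int) by norm_num, ← Int.natCast_ediv, Int.toNat_natCast]
  · have : n = 0 := by omega
    subst this; decide
theorem pv_step (L : List String) (k : Nat) :
    PySem.List.slice L (some ((0:Int) + 16 * ((k+1 : Nat):Int))) (some ((0:Int) + 16 * ((k+1 : Nat):Int) + 16)) =
      PySem.List.slice (L.drop 16) (some ((0:Int) + 16 * ((k:Nat):Int))) (some ((0:Int) + 16 * ((k:Nat):Int) + 16)) := by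
  have e1 : (0:Int) + 16 * ((k+1 : Nat):Int) = ((16*(k+1) : Nat) : Int) := by push_cast; ring
  have e2 : (0:Int) + 16 * ((k:Nat) : Int) = ((16*k : Nat) : Int) := by push_cast; ring
  rw [e1, e2]
  rw [show ((16*(k+1) : Nat) : Int) + 16 = ((16*(k+1) : Nat) : Int) + ((16:Nat):Int) by norm_num]
  rw [show ((16*k : Nat) : Int) + 16 = ((16*k : Nat) : Int) + ((16:Nat):Int) by norm_num]
  rw [PySem.List.slice_natCast_add, PySem.List.slice_natCast_add, List.drop_drop]
  congr 2
  omega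
theorem pv_slice_head (L : List String) :
    PySem.List.slice L (some ((0:Int) + 16 * ((0:Nat):Int))) (some ((0:Int) + 16 * ((0:Nat):Int) + 16)) = L.take 16 := by
  rw [show (0:Int) + 16 * ((0:Nat):Int) = ((0:Nat):Int) by norm_num]
  rw [show ((0:Nat):Int) + 16 = ((0:Nat):Int) + ((16:Nat):Int) by norm_num]
  rw [PySem.List.slice_natCast_add]
  simp


theorem pv_chunkLines_nil : pvChunkLines [] = [] := by
  rw [pvChunkLines]; rfl

theorem pv_join_chunk_fuel (k : Nat) : ∀ (L : List String) (m : Nat), L.length ≤ k →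
    (if L = [] then ([] : List Char) else (", 
        ").toList) ++
        (PySem.Str.join ", 
        " (pvChunkLines L)).toList =
      pvInterCh (16 * m) (L.map String.toList) := by
  induction k with
  | zero =>
      intro L m hL
      have h : L = [] := List.eq_nil_of_length_eq_zero (by omega)
      subst h
      simp [pv_chunkLines_nil, PySem.Str.toList_join, PySem.Chars.join_nil, pvInterCh]
  | succ k ih =>
      intro L m hL
      by_cases h : L = []
      · subst h
        simp [pv_chunkLines_nil, PySem.Str.toList_join, PySem.Chars.join_nil, pvInterCh]
      · rw [if_neg h, pvChunkLines, dif_neg h, pv_join_toList_cons]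
        by_cases hr : L.drop 16 = []
        · have hlen : L.length ≤ 16 := by
            have := List.length_drop (l := L) (i := 16); rw [hr] at this; simp at this; omega
          have hcl : pvChunkLines (L.drop 16) = [] := by rw [hr, pv_chunkLines_nil]
          rw [hcl, if_pos rfl, List.take_of_length_le hlen, List.append_nil]
          exact pv_inner_chunk L (16 * m) h (Nat.mul_mod_right 16 m) hlen
        · have hlen : 16 < L.length := by
            have := List.length_drop (l := L) (i := 16)
            have hpos : 0 < (L.drop 16).length := List.length_pos_iff.mpr hr
            omega
          have hne : pvChunkLines (L.drop 16) ≠ [] := by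
            rw [pvChunkLines, dif_neg hr]; exact List.cons_ne_nil _ _
          rw [if_neg hne]
          have htake : (L.take 16).length = 16 := by simp [List.length_take]; omega
          have h1 := pv_inner_chunk (L.take 16) (16 * m)
            (by simp [List.take_eq_nil_iff]; omega) (Nat.mul_mod_right 16 m) (le_of_eq htake)
          have h2 := ih (L.drop 16) (m + 1) (by simp [List.length_drop]; omega)
          rw [if_neg hr] at h2
          conv_rhs => rw [← List.take_append_drop 16 L]
          rw [List.map_append, pv_interCh_append, List.length_map, htake,
            show 16 * m + 16 = 16 * (m + 1) by ring, ← h1, ← h2]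
          simp [List.append_assoc]

theorem pv_pyRange_chunk_fuel (k : Nat) : ∀ (L : List String), L.length ≤ k →
    (PySem.List.pyRange 0 (L.length : Int) 16).map
        (fun i => PySem.Str.join ", " (PySem.List.slice L (some i) (some (i + 16)))) =
      pvChunkLines L := by
  induction k with
  | zero =>
      intro L hL
      have h : L = [] := List.eq_nil_of_length_eq_zero (by omega)
      subst h
      rw [pv_pyRange16]
      simp [pv_chunkLines_nil]
  | succ k ih =>
      intro L hL
      by_cases h : L = []
      · subst h; rw [pv_pyRange16]; simp [pv_chunkLines_nil]
      · have hpos : 0 < L.length := List.length_pos_iff.mpr h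
        rw [pv_pyRange16,
          show (L.length + 15) / 16 = ((L.drop 16).length + 15) / 16 + 1 by
            simp [List.length_drop]; omega,
          List.range_succ_eq_map, pvChunkLines, dif_neg h]
        simp only [List.map_cons, List.map_map]
        congr 1
        · exact congrArg _ (pv_slice_head L)
        · rw [← ih (L.drop 16) (by simp [List.length_drop]; omega), pv_pyRange16]
          simp only [List.map_map]
          refine List.map_congr_left (fun a _ => ?_)
          simp only [Function.comp, Nat.succ_eq_add_one]
          exact congrArg _ (pv_step L a)

theorem pv_A_eq (data : List Int) :
    (to_rust_hex data).toList = pvCanon (data.map pvFmt0x02X) := by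
  have key := pv_foldA data.length data 0 [] (by simp)
  have tail : (PySem.Str.join "" ([] : List String)).toList ++ pvTailA 0 (data.map pvFmt0x02X) =
      pvCanon (data.map pvFmt0x02X) := by
    cases data with
    | nil => simp [pvTailA, pvCanon]
    | cons x t =>
        simp only [List.map_cons, pvCanon, pvTailA, pv_join0]
        rw [← pv_tailA_interCh (t.map pvFmt0x02X) 1 (by omega)]
        simp [List.map_eq_nil_iff]
  exact key.trans tail

theorem pv_B_eq (data : List Int) :
    (to_rust_hex_alt data).toList = pvCanon (data.map pvFmt0x02X) := by
  simp only [to_rust_hex_alt, PySem.List.len_eq]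
  rw [pv_pyRange_chunk_fuel (data.map (fun b => String.ofList (pvFmt0x02X b))).length _ le_rfl]
  have hmap : (data.map (fun b => String.ofList (pvFmt0x02X b))).map String.toList =
      data.map pvFmt0x02X := by
    rw [List.map_map]; exact List.map_congr_left (fun a _ => String.toList_ofList)
  have hjc := pv_join_chunk_fuel (data.map (fun b => String.ofList (pvFmt0x02X b))).length
    (data.map (fun b => String.ofList (pvFmt0x02X b))) 0 le_rfl
  rw [hmap] at hjc
  cases data with
  | nil =>
      simp only [List.map_nil, pv_chunkLines_nil, pvCanon]
      simp [PySem.Str.toList_join, PySem.Chars.join_nil]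
  | cons x t =>
      simp only [List.map_cons] at hjc ⊢
      rw [if_neg (List.cons_ne_nil _ _)] at hjc
      have he : pvInterCh (16 * 0) (pvFmt0x02X x :: t.map pvFmt0x02X) =
          (", \n        ").toList ++ pvCanon (pvFmt0x02X x :: t.map pvFmt0x02X) := by
        simp only [pvInterCh, pvCanon, pvSepCh, Nat.mul_zero, Nat.zero_mod]
        simp
      rw [he] at hjc
      exact List.append_cancel_left hjc

-- ===== VERDICT (by name: the statement is the Claim_ definition above) =====
theorem to_rust_hex_spec : Claim_equal_to_rust_hex := by
  intro data _
  unfold Spec_to_rust_hex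
  exact String.ext ((pv_A_eq data).trans (pv_B_eq data).symm)
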